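-- pv_equiv track=rewrite | github.com/jiaxun-li/Exact-ATE-Strata-Binary | main/Algo_for_extend_permute/Balanced.py | Ni_jiaxun_generator
-- ===== SOURCE A (Python) =====
-- def Ni_jiaxun_generator(matrix_Ni_dict: dict, Ni: int, tau: int):
--     '''
--     Generate the potential outcome tables algebraically consistent with the the observed table and has the lowest value of |N11-N00| with the given tau(see Theorem A.7).
--
--     Parameters:
--     ----------
--     matrix_Ni_dict : dict
--         the dictionary of potential outcome tables, generated from the  function Ni_generator
--     Ni : int
--         The  size of subjects
--     tau : int
--         Ni times the average treatment effect
--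
--     Returns:
--     --------
--     matrix_Ni_list_jiaxun : list,
--         a lists of potential outcome tables algebraically consistent with the the observed table and has the lowest value of |N11-N00| with the given tau (see Theorem A.7).
--     '''
--     matrix_Ni_list_jiaxun=[]
--     min_jiaxun1=10000
--     min_jiaxun2=10000
--     for min_N10_N01 in range(Ni//2):
--         if min_N10_N01 not in matrix_Ni_dict[tau]:
--             continue
--         for matrix_Ni in matrix_Ni_dict[tau][min_N10_N01]:
--             N11,N10,N01,N00=matrix_Ni
--             if (N11+N10)%2==1 and abs(N11-N00)<min_jiaxun1:
--                 min_jiaxun1=abs(N11-N00)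
--             if (N11+N10)%2==0 and abs(N11-N00)<min_jiaxun2:
--                 min_jiaxun2=abs(N11-N00)
--         for matrix_Ni in matrix_Ni_dict[tau][min_N10_N01]:
--             N11,N10,N01,N00=matrix_Ni
--             if (N11+N10)%2==1 and abs(N11-N00)>min_jiaxun1:
--                 continue
--             if (N11+N10)%2==0 and abs(N11-N00)>min_jiaxun2:
--                 continue
--             matrix_Ni_list_jiaxun.append(matrix_Ni)
--     return matrix_Ni_list_jiaxun
-- ===== SOURCE B (Python) =====
-- def Ni_jiaxun_generator(matrix_Ni_dict: dict, Ni: int, tau: int):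
--     """Two-pass re-implementation: first record, per present group, the inclusive
--     prefix minima of |N11-N00| split by the parity of N11+N10; then filter each
--     group against its recorded thresholds.  Missing tau yields []."""
--     groups = matrix_Ni_dict.get(tau, {})
--     thresh = {}
--     m_odd = 10000
--     m_even = 10000
--     for k in range(Ni // 2):
--         if k in groups:
--             p = (m_odd, m_even)
--             for m in groups[k]:
--                 d = abs(m[0] - m[3])
--                 if (m[0] + m[1]) % 2 != 0:
--                     p = (min(p[0], d), p[1])
--                 else:
--                     p = (p[0], min(p[1], d))
--             thresh[k] = p
--             m_odd, m_even = p
--     out = []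
--     for k in range(Ni // 2):
--         if k in thresh:
--             p = thresh[k]
--             out += [m for m in groups[k]
--                     if abs(m[0] - m[3]) <= (p[0] if (m[0] + m[1]) % 2 != 0 else p[1])]
--     return out
-- ===== Notes on version B (the rewrite author's own statement) =====
-- stated objective: alternative
-- what changed: A interleaves min-tracking and filtering in one pass over the groups with loop-carried minima; B makes two separate global passes, first recording per-group inclusive prefix parity-split minima into a threshold table, then filtering every group against its recorded thresholds.
import Mathlib
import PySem

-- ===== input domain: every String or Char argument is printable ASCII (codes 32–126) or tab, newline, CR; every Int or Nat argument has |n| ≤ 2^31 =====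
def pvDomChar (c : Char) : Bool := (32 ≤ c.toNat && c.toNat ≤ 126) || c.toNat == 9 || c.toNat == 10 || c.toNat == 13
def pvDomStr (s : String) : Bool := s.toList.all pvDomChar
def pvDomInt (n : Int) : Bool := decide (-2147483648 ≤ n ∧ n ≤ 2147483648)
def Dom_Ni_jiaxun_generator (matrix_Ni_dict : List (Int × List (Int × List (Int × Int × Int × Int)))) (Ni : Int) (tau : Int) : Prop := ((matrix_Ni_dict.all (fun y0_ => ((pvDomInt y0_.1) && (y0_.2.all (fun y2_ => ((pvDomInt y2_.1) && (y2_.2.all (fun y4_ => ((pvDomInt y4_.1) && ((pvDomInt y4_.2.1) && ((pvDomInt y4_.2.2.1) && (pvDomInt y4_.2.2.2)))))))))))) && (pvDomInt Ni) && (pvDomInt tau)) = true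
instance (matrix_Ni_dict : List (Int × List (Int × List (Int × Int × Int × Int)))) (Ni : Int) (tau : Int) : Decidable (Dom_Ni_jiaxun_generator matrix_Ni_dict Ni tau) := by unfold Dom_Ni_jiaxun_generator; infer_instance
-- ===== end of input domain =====

-- B replaces A's single interleaved pass (loop-carried minima, filter in the same iteration) by two
-- global passes: record per-group inclusive prefix parity-split minima in a table, then filter.

-- ===== PORT A =====
-- A's first inner loop body: update the pair (min_jiaxun1, min_jiaxun2) from one matrix.
def pvA_minStep (p : Int × Int) (m : Int × Int × Int × Int) : Int × Int :=
  let m1 := if PySem.Int.mod (m.1 + m.2.1) 2 = 1 ∧ |m.1 - m.2.2.2| < p.1 then |m.1 - m.2.2.2| else p.1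
  let m2 := if PySem.Int.mod (m.1 + m.2.1) 2 = 0 ∧ |m.1 - m.2.2.2| < p.2 then |m.1 - m.2.2.2| else p.2
  (m1, m2)

-- A's second inner loop body: the two 'continue's, else append.
def pvA_keepStep (p : Int × Int) (acc : List (Int × Int × Int × Int)) (m : Int × Int × Int × Int) :
    List (Int × Int × Int × Int) :=
  if PySem.Int.mod (m.1 + m.2.1) 2 = 1 ∧ |m.1 - m.2.2.2| > p.1 then acc
  else if PySem.Int.mod (m.1 + m.2.1) 2 = 0 ∧ |m.1 - m.2.2.2| > p.2 then acc
  else acc ++ [m]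

-- One iteration of A's outer loop over min_N10_N01 = k ('continue' when k is not a key of g).
def pvA_step (g : PySem.Dict Int (List (Int × Int × Int × Int)))
    (st : List (Int × Int × Int × Int) × Int × Int) (k : Int) :
    List (Int × Int × Int × Int) × Int × Int :=
  match g.get? k with
  | none => st
  | some ms =>
    let p := ms.foldl pvA_minStep (st.2.1, st.2.2)
    (ms.foldl (pvA_keepStep p) st.1, p)

-- matrix_Ni_dict[tau] raises KeyError when absent; that is excluded by Pre_, the port uses getD [].
def Ni_jiaxun_generator (matrix_Ni_dict : List (Int × List (Int × List (Int × Int × Int × Int)))) (Ni : Int) (tau : Int) : List (Int × Int × Int × Int) :=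
  let g := PySem.Dict.mk (((PySem.Dict.mk matrix_Ni_dict).get? tau).getD [])
  ((PySem.List.pyRange 0 (PySem.Int.floordiv Ni 2) 1).foldl (pvA_step g)
    ([], 10000, 10000)).1

-- ===== PORT B =====
-- Source B's inner minima update (parity split, min).
def pvB_minStep (p : Int × Int) (m : Int × Int × Int × Int) : Int × Int :=
  let d := |m.1 - m.2.2.2|
  if PySem.Int.mod (m.1 + m.2.1) 2 ≠ 0 then (min p.1 d, p.2) else (p.1, min p.2 d)

-- Source B's first pass body: record the inclusive prefix minima pair for present group k.
def pvB_recStep (g : PySem.Dict Int (List (Int × Int × Int × Int)))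
    (st : PySem.Dict Int (Int × Int) × Int × Int) (k : Int) :
    PySem.Dict Int (Int × Int) × Int × Int :=
  match g.get? k with
  | none => st
  | some ms =>
    let p := ms.foldl pvB_minStep (st.2.1, st.2.2)
    (st.1.insert k p, p)

-- Source B's threshold test (the comprehension condition in Source B's second pass).
def pvB_pred (p : Int × Int) (m : Int × Int × Int × Int) : Bool :=
  decide (|m.1 - m.2.2.2| ≤ (if PySem.Int.mod (m.1 + m.2.1) 2 ≠ 0 then p.1 else p.2))

-- Source B's second pass body: filter group k against its recorded thresholds.
def pvB_outStep (g : PySem.Dict Int (List (Int × Int × Int × Int)))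
    (thresh : PySem.Dict Int (Int × Int))
    (out : List (Int × Int × Int × Int)) (k : Int) : List (Int × Int × Int × Int) :=
  match thresh.get? k with
  | none => out
  | some p =>
    out ++ ((g.get? k).getD []).filter (pvB_pred p)

def Ni_jiaxun_generator_alt (matrix_Ni_dict : List (Int × List (Int × List (Int × Int × Int × Int)))) (Ni : Int) (tau : Int) : List (Int × Int × Int × Int) :=
  let g := PySem.Dict.mk (((PySem.Dict.mk matrix_Ni_dict).get? tau).getD [])
  let r := PySem.List.pyRange 0 (PySem.Int.floordiv Ni 2) 1
  let thresh := (r.foldl (pvB_recStep g) (PySem.Dict.empty, 10000, 10000)).1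
  r.foldl (pvB_outStep g thresh) []

-- ===== PRECONDITION & SPEC =====
-- Pre_ excludes exactly the inputs where Python A raises KeyError: a nonempty range with tau
-- not a key of matrix_Ni_dict.
def Pre_Ni_jiaxun_generator (matrix_Ni_dict : List (Int × List (Int × List (Int × Int × Int × Int)))) (Ni : Int) (tau : Int) : Prop :=
  PySem.Int.floordiv Ni 2 ≤ 0 ∨ (PySem.Dict.mk matrix_Ni_dict).contains tau = true
instance (matrix_Ni_dict : List (Int × List (Int × List (Int × Int × Int × Int)))) (Ni : Int) (tau : Int) : Decidable (Pre_Ni_jiaxun_generator matrix_Ni_dict Ni tau) := by unfold Pre_Ni_jiaxun_generator; infer_instance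

def pvWitness_Ni_jiaxun_generator : (List (Int × List (Int × List (Int × Int × Int × Int)))) × Int × Int :=
  ([(0, [(0, [(1, 0, 0, 0), (2, 0, 0, 0)])])], 2, 0)

def Spec_Ni_jiaxun_generator (matrix_Ni_dict : List (Int × List (Int × List (Int × Int × Int × Int)))) (Ni : Int) (tau : Int) (out : List (Int × Int × Int × Int)) : Prop := out = Ni_jiaxun_generator_alt matrix_Ni_dict Ni tau
instance (matrix_Ni_dict : List (Int × List (Int × List (Int × Int × Int × Int)))) (Ni : Int) (tau : Int) (out : List (Int × Int × Int × Int)) : Decidable (Spec_Ni_jiaxun_generator matrix_Ni_dict Ni tau out) := by unfold Spec_Ni_jiaxun_generator; infer_instance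

-- ===== CLAIM (what is proved, stated in full; the proofs are below) =====
def Claim_equal_Ni_jiaxun_generator : Prop := ∀ (matrix_Ni_dict : List (Int × List (Int × List (Int × Int × Int × Int)))) (Ni : Int) (tau : Int), Dom_Ni_jiaxun_generator matrix_Ni_dict Ni tau → Pre_Ni_jiaxun_generator matrix_Ni_dict Ni tau → Spec_Ni_jiaxun_generator matrix_Ni_dict Ni tau (Ni_jiaxun_generator matrix_Ni_dict Ni tau)
-- ===== LEMMAS AND PROOFS =====

-- The two inner minima updates are the same function.
theorem pv_minStep_eq : pvA_minStep = pvB_minStep := by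
  funext p m
  unfold pvA_minStep pvB_minStep
  rcases PySem.Int.mod_two_eq (m.1 + m.2.1) with h | h
  · simp only [h, min_def]
    split_ifs <;> simp_all [Prod.ext_iff] <;> omega
  · simp only [h, min_def]
    split_ifs <;> simp_all [Prod.ext_iff] <;> omega

-- A's filter-by-continue body, written as the single threshold test B uses.
theorem pv_keepStep_eq (p : Int × Int) (acc : List (Int × Int × Int × Int)) (m : Int × Int × Int × Int) :
    pvA_keepStep p acc m = if pvB_pred p m then acc ++ [m] else acc := by
  unfold pvA_keepStep pvB_pred
  rcases PySem.Int.mod_two_eq (m.1 + m.2.1) with h | h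
  · simp only [h]
    split_ifs <;> simp_all <;> omega
  · simp only [h]
    split_ifs <;> simp_all <;> omega

-- A's second inner loop appends exactly the matrices passing B's threshold test.
theorem pv_keep_eq_filter (p : Int × Int) (ms : List (Int × Int × Int × Int))
    (acc : List (Int × Int × Int × Int)) :
    ms.foldl (pvA_keepStep p) acc = acc ++ ms.filter (pvB_pred p) := by
  induction ms generalizing acc with
  | nil => simp
  | cons m ms ih =>
    rw [List.foldl_cons, pv_keepStep_eq]
    cases hb : pvB_pred p m
    · simp only [Bool.false_eq_true, if_false, ih, List.filter_cons, hb]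
    · simp only [if_true, ih, List.filter_cons, hb, List.append_assoc, List.singleton_append]

-- Step-shape lemmas (keep the foldl bodies folded while rewriting the head application).
theorem pvB_recStep_none (g : PySem.Dict Int (List (Int × Int × Int × Int)))
    (st : PySem.Dict Int (Int × Int) × Int × Int) (k : Int) (hg : g.get? k = none) :
    pvB_recStep g st k = st := by
  unfold pvB_recStep; rw [hg]

theorem pvB_recStep_some (g : PySem.Dict Int (List (Int × Int × Int × Int)))
    (th : PySem.Dict Int (Int × Int)) (m1 m2 : Int) (k : Int)
    (ms : List (Int × Int × Int × Int)) (hg : g.get? k = some ms) :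
    pvB_recStep g (th, m1, m2) k = (th.insert k (ms.foldl pvB_minStep (m1, m2)), ms.foldl pvB_minStep (m1, m2)) := by
  unfold pvB_recStep; rw [hg]

theorem pvA_step_none (g : PySem.Dict Int (List (Int × Int × Int × Int)))
    (st : List (Int × Int × Int × Int) × Int × Int) (k : Int) (hg : g.get? k = none) :
    pvA_step g st k = st := by
  unfold pvA_step; rw [hg]

theorem pvA_step_some (g : PySem.Dict Int (List (Int × Int × Int × Int)))
    (acc : List (Int × Int × Int × Int)) (m1 m2 : Int) (k : Int)
    (ms : List (Int × Int × Int × Int)) (hg : g.get? k = some ms) :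
    pvA_step g (acc, m1, m2) k =
      (acc ++ ms.filter (pvB_pred (ms.foldl pvB_minStep (m1, m2))),
        ms.foldl pvB_minStep (m1, m2)) := by
  unfold pvA_step; rw [hg]
  simp only [pv_minStep_eq]
  rw [pv_keep_eq_filter]

theorem pvB_outStep_none (g : PySem.Dict Int (List (Int × Int × Int × Int)))
    (thresh : PySem.Dict Int (Int × Int)) (out : List (Int × Int × Int × Int)) (k : Int)
    (hk : thresh.get? k = none) : pvB_outStep g thresh out k = out := by
  unfold pvB_outStep; rw [hk]

theorem pvB_outStep_some (g : PySem.Dict Int (List (Int × Int × Int × Int)))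
    (thresh : PySem.Dict Int (Int × Int)) (out : List (Int × Int × Int × Int)) (k : Int)
    (p : Int × Int) (ms : List (Int × Int × Int × Int))
    (hk : thresh.get? k = some p) (hg : g.get? k = some ms) :
    pvB_outStep g thresh out k = out ++ ms.filter (pvB_pred p) := by
  unfold pvB_outStep; rw [hk, hg]; rfl

-- The first pass only touches keys it visits: a key outside ks keeps its binding.
theorem pv_rec_get?_of_not_mem (g : PySem.Dict Int (List (Int × Int × Int × Int)))
    (ks : List Int) (th : PySem.Dict Int (Int × Int)) (m1 m2 : Int) (k : Int)
    (hk : k ∉ ks) :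
    ((ks.foldl (pvB_recStep g) (th, m1, m2)).1).get? k = th.get? k := by
  induction ks generalizing th m1 m2 with
  | nil => rfl
  | cons k' ks ih =>
    have hne : k ≠ k' := by intro h; exact hk (h ▸ List.mem_cons_self ..)
    have hk' : k ∉ ks := fun h => hk (List.mem_cons_of_mem _ h)
    rw [List.foldl_cons]
    cases hg : g.get? k' with
    | none =>
      rw [pvB_recStep_none g _ k' hg]
      exact ih th m1 m2 hk'
    | some ms =>
      rw [pvB_recStep_some g th m1 m2 k' ms hg, ih _ _ _ hk']
      exact PySem.Dict.get?_insert_of_ne th _ hne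

-- Main invariant: B's two passes compute A's interleaved pass, for any nodup key list,
-- any starting minima and any threshold table not containing the remaining keys.
theorem pv_main (g : PySem.Dict Int (List (Int × Int × Int × Int)))
    (ks : List Int) (hnd : ks.Nodup)
    (th : PySem.Dict Int (Int × Int)) (hth : ∀ k ∈ ks, th.contains k = false)
    (acc : List (Int × Int × Int × Int)) (m1 m2 : Int) :
    ks.foldl (pvB_outStep g (ks.foldl (pvB_recStep g) (th, m1, m2)).1) acc =
      (ks.foldl (pvA_step g) (acc, m1, m2)).1 := by
  induction ks generalizing th acc m1 m2 with
  | nil => rfl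
  | cons k ks ih =>
    have hknotin : k ∉ ks := (List.nodup_cons.mp hnd).1
    have hnd' : ks.Nodup := (List.nodup_cons.mp hnd).2
    have hth' : ∀ k' ∈ ks, th.contains k' = false :=
      fun k' hk' => hth k' (List.mem_cons_of_mem _ hk')
    cases hg : g.get? k with
    | none =>
      have hget : ((ks.foldl (pvB_recStep g) (th, m1, m2)).1).get? k = none := by
        rw [pv_rec_get?_of_not_mem g ks th m1 m2 k hknotin]
        exact (PySem.Dict.get?_eq_none_iff_contains th k).mpr (hth k (List.mem_cons_self ..))
      rw [List.foldl_cons, List.foldl_cons, List.foldl_cons,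
        pvB_recStep_none g _ k hg, pvA_step_none g _ k hg,
        pvB_outStep_none g _ acc k hget]
      exact ih hnd' th hth' acc m1 m2
    | some ms =>
      have hget : ((ks.foldl (pvB_recStep g)
          (th.insert k (ms.foldl pvB_minStep (m1, m2)), ms.foldl pvB_minStep (m1, m2))).1).get? k =
          some (ms.foldl pvB_minStep (m1, m2)) := by
        rw [pv_rec_get?_of_not_mem g ks _ _ _ k hknotin, PySem.Dict.get?_insert_self]
      have hth'' : ∀ k' ∈ ks, (th.insert k (ms.foldl pvB_minStep (m1, m2))).contains k' = false := by
        intro k' hk'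
        rw [PySem.Dict.contains_insert]
        have hne : k' ≠ k := fun h => hknotin (h ▸ hk')
        simp [hne, hth' k' hk']
      rw [List.foldl_cons, List.foldl_cons, List.foldl_cons,
        pvB_recStep_some g th m1 m2 k ms hg, pvA_step_some g acc m1 m2 k ms hg,
        pvB_outStep_some g _ acc k _ ms hget hg]
      exact ih hnd' _ hth'' _ _ _

-- ===== VERDICT (by name: the statement is the Claim_ definition above) =====
theorem Ni_jiaxun_generator_spec : Claim_equal_Ni_jiaxun_generator := by
  intro matrix_Ni_dict Ni tau _ _
  unfold Spec_Ni_jiaxun_generator Ni_jiaxun_generator Ni_jiaxun_generator_alt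
  exact (pv_main _ _ (PySem.List.nodup_pyRange_one 0 (PySem.Int.floordiv Ni 2))
    PySem.Dict.empty (fun k _ => PySem.Dict.contains_empty k) [] 10000 10000).symm
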